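-- pv_equiv track=rewrite | github.com/gongfan1213/LLMuserprofile | src/core/tag_extraction.py | _analyze_usage_patterns
-- ===== SOURCE A (Python) =====
-- from typing import Dict, List, Any, Optional
--
-- def _analyze_usage_patterns(usage_time: Dict[str, Any]) -> Dict[str, str]:
--     """使用模式分析"""
--     patterns = {}
--
--     # 分析使用时段
--     peak_hours = usage_time.get("peak_hours", [])
--     if peak_hours:
--         if any(hour in peak_hours for hour in range(6, 12)):
--             patterns["morning_user"] = "是"
--         if any(hour in peak_hours for hour in range(12, 18)):
--             patterns["afternoon_user"] = "是"
--         if any(hour in peak_hours for hour in range(18, 24)):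
--             patterns["evening_user"] = "是"
--         if any(hour in peak_hours for hour in list(range(0, 6)) + list(range(22, 24))):
--             patterns["night_user"] = "是"
--
--     return patterns
-- ===== SOURCE B (Python) =====
-- def _analyze_usage_patterns(usage_time):
--     """使用模式分析: one pass over peak_hours with constant hour-bucket sets."""
--     morning = set(range(6, 12))
--     afternoon = set(range(12, 18))
--     evening = set(range(18, 24))
--     night = set(range(0, 6)) | {22, 23}
--
--     patterns = {}
--     peak_hours = usage_time.get("peak_hours", [])
--     if peak_hours:
--         m = a = e = n = False
--         for hour in peak_hours:
--             m = m or hour in morning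
--             a = a or hour in afternoon
--             e = e or hour in evening
--             n = n or hour in night
--         if m:
--             patterns["morning_user"] = "是"
--         if a:
--             patterns["afternoon_user"] = "是"
--         if e:
--             patterns["evening_user"] = "是"
--         if n:
--             patterns["night_user"] = "是"
--     return patterns
-- ===== Notes on version B (the rewrite author's own statement) =====
-- stated objective: alternative
-- what changed: Replaces four scans of hour ranges (each doing a membership test against peak_hours) by a single pass over peak_hours that accumulates four bucket flags via constant hour-bucket sets.
import Mathlib
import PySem

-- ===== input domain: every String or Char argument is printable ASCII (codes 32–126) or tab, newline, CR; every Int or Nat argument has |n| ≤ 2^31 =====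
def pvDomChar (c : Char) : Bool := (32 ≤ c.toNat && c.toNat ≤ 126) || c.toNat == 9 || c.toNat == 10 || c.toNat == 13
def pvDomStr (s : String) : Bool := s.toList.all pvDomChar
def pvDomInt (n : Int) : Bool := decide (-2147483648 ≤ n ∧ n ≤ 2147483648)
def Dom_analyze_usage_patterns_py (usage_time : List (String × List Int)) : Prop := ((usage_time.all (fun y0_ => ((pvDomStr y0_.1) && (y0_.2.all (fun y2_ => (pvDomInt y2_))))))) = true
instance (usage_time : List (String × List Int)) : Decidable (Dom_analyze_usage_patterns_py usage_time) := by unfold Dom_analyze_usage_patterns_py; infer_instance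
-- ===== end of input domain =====

-- B replaces A's four range-scans over peak_hours by a single pass accumulating four bucket flags via constant hour-bucket sets (objective: alternative).


-- ===== PORT A =====
def analyze_usage_patterns_py (usage_time : List (String × List Int)) : List (String × String) :=
  let patterns : PySem.Dict String String := PySem.Dict.empty
  let peak_hours := PySem.Dict.getD (PySem.Dict.mk usage_time) "peak_hours" []
  if peak_hours.isEmpty then patterns.items
  else
    let patterns := if (PySem.List.pyRange 6 12 1).any (fun hour => peak_hours.contains hour) then
        PySem.Dict.insert patterns "morning_user" "是" else patterns
    let patterns := if (PySem.List.pyRange 12 18 1).any (fun hour => peak_hours.contains hour) then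
        PySem.Dict.insert patterns "afternoon_user" "是" else patterns
    let patterns := if (PySem.List.pyRange 18 24 1).any (fun hour => peak_hours.contains hour) then
        PySem.Dict.insert patterns "evening_user" "是" else patterns
    let patterns := if (PySem.List.pyRange 0 6 1 ++ PySem.List.pyRange 22 24 1).any (fun hour => peak_hours.contains hour) then
        PySem.Dict.insert patterns "night_user" "是" else patterns
    patterns.items

-- ===== PORT B =====
-- the four constant hour-bucket sets (distinct elements; membership-only use)
def pvMorningSet : List Int := [6, 7, 8, 9, 10, 11]
def pvAfternoonSet : List Int := [12, 13, 14, 15, 16, 17]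
def pvEveningSet : List Int := [18, 19, 20, 21, 22, 23]
def pvNightSet : List Int := [0, 1, 2, 3, 4, 5, 22, 23]

def analyze_usage_patterns_py_alt (usage_time : List (String × List Int)) : List (String × String) :=
  let peak_hours := PySem.Dict.getD (PySem.Dict.mk usage_time) "peak_hours" []
  if peak_hours.isEmpty then []
  else
    let st := peak_hours.foldl
      (fun (s : Bool × Bool × Bool × Bool) hour =>
        (s.1 || pvMorningSet.contains hour,
         s.2.1 || pvAfternoonSet.contains hour,
         s.2.2.1 || pvEveningSet.contains hour,
         s.2.2.2 || pvNightSet.contains hour))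
      (false, false, false, false)
    (if st.1 then [("morning_user", "是")] else []) ++
    (if st.2.1 then [("afternoon_user", "是")] else []) ++
    (if st.2.2.1 then [("evening_user", "是")] else []) ++
    (if st.2.2.2 then [("night_user", "是")] else [])

-- ===== PRECONDITION & SPEC =====
def Spec_analyze_usage_patterns_py (usage_time : List (String × List Int)) (out : List (String × String)) : Prop := out = analyze_usage_patterns_py_alt usage_time
instance (usage_time : List (String × List Int)) (out : List (String × String)) : Decidable (Spec_analyze_usage_patterns_py usage_time out) := by unfold Spec_analyze_usage_patterns_py; infer_instance

-- ===== CLAIM (what is proved, stated in full; the proofs are below) =====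
def Claim_equal_analyze_usage_patterns_py : Prop := ∀ (usage_time : List (String × List Int)), Dom_analyze_usage_patterns_py usage_time → Spec_analyze_usage_patterns_py usage_time (analyze_usage_patterns_py usage_time)

-- ===== LEMMAS AND PROOFS =====

-- swapping the two sides of a membership scan
theorem pv_any_mem_comm (L peak : List Int) :
    L.any (fun h => peak.contains h) = peak.any (fun h => L.contains h) := by
  rw [Bool.eq_iff_iff]
  simp only [List.any_eq_true, List.contains_eq_mem, decide_eq_true_eq]
  exact ⟨fun ⟨a, h1, h2⟩ => ⟨a, h2, h1⟩, fun ⟨a, h1, h2⟩ => ⟨a, h2, h1⟩⟩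

-- B's single fold computes the four 'any' flags
theorem pv_fold_flags (peak : List Int) (m a e n : Bool) :
    peak.foldl
      (fun (s : Bool × Bool × Bool × Bool) hour =>
        (s.1 || pvMorningSet.contains hour,
         s.2.1 || pvAfternoonSet.contains hour,
         s.2.2.1 || pvEveningSet.contains hour,
         s.2.2.2 || pvNightSet.contains hour))
      (m, a, e, n)
    = (m || peak.any (fun h => pvMorningSet.contains h),
       a || peak.any (fun h => pvAfternoonSet.contains h),
       e || peak.any (fun h => pvEveningSet.contains h),
       n || peak.any (fun h => pvNightSet.contains h)) := by
  induction peak generalizing m a e n with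
  | nil => simp
  | cons x xs ih =>
    rw [List.foldl_cons, ih]
    simp [List.any_cons, Bool.or_assoc]

-- ===== VERDICT (by name: the statement is the Claim_ definition above) =====
theorem analyze_usage_patterns_py_spec : Claim_equal_analyze_usage_patterns_py := by
  intro usage_time _
  unfold Spec_analyze_usage_patterns_py analyze_usage_patterns_py analyze_usage_patterns_py_alt
  set peak := PySem.Dict.getD (PySem.Dict.mk usage_time) "peak_hours" ([] : List Int) with hpeak
  by_cases hE : peak.isEmpty
  · simp [hE, PySem.Dict.empty]
  · simp only [hE, pv_fold_flags, Bool.false_or]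
    have h1 : PySem.List.pyRange 6 12 1 = pvMorningSet := by decide
    have h2 : PySem.List.pyRange 12 18 1 = pvAfternoonSet := by decide
    have h3 : PySem.List.pyRange 18 24 1 = pvEveningSet := by decide
    have h4 : PySem.List.pyRange 0 6 1 ++ PySem.List.pyRange 22 24 1 = pvNightSet := by decide
    rw [h1, h2, h3, h4, pv_any_mem_comm pvMorningSet peak, pv_any_mem_comm pvAfternoonSet peak,
      pv_any_mem_comm pvEveningSet peak, pv_any_mem_comm pvNightSet peak]
    cases hb1 : peak.any (fun h => pvMorningSet.contains h) <;>
    cases hb2 : peak.any (fun h => pvAfternoonSet.contains h) <;>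
    cases hb3 : peak.any (fun h => pvEveningSet.contains h) <;>
    cases hb4 : peak.any (fun h => pvNightSet.contains h) <;>
      rfl
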